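-- pv_equiv track=rewrite | github.com/paasong/Programmers | Programmers/Level 1/비밀지도.py | solution
-- ===== SOURCE A (Python) =====
-- def solution(n, arr1, arr2):
--     remainder1 = 0
--     remainder2 = 0
--
--
--     answer =list()
--
--     for num1, num2 in zip(arr1, arr2):
--         restr = ''
--         for i in range(n):
--             remainder1, remainder2 = num1 % 2, num2 % 2
--             num1, num2 = num1 // 2 , num2 //2
--             if remainder1 == 0 and remainder2 == 0 :
--                 restr = ' ' + restr
--             else:
--                 restr = '#' + restr
--
--         answer.append(restr)
--
--
--
--     return answer
-- ===== SOURCE B (Python) =====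
-- def solution(n, arr1, arr2):
--     if n <= 0:
--         return ['' for _ in zip(arr1, arr2)]
--     mask = (1 << n) - 1
--     return [format((a | b) & mask, 'b').zfill(n).replace('1', '#').replace('0', ' ')
--             for a, b in zip(arr1, arr2)]
-- ===== Notes on version B (the rewrite author's own statement) =====
-- stated objective: idiomatic
-- what changed: A peels bits one at a time with an inner per-bit %2///2 loop that prepends characters; B eliminates that inner loop entirely, computing each row with a single OR plus mask and one library binary-format/zfill/replace pass.
import Mathlib
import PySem

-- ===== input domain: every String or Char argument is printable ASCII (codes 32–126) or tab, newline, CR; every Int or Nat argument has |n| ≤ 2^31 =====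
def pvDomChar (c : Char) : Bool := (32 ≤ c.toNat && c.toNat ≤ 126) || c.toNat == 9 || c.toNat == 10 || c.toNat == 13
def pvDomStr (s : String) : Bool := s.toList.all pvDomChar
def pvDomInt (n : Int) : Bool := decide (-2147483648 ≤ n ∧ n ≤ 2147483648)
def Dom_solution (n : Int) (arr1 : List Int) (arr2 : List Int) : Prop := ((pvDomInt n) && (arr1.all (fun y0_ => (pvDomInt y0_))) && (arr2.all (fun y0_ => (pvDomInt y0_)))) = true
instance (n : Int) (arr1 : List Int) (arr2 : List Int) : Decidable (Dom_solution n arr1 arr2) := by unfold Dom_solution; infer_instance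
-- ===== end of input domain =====

-- B replaces A's per-bit modulo/divide inner loop by one OR, one AND mask and one binary
-- string formatting + padding + character-replacement pass per row (objective: idiomatic).

-- ===== PORT A =====
-- literal transliteration of A: outer loop over zip(arr1, arr2), inner loop over range(n)
-- peeling bits with % 2 and // 2, prepending ' '/'#' to the row string.
def solution (n : Int) (arr1 : List Int) (arr2 : List Int) : List String :=
  (List.zip arr1 arr2).foldl
    (fun answer p =>
      let r :=
        (PySem.List.pyRange 0 n 1).foldl
          (fun (st : Int × Int × String) (_i : Int) =>
            let remainder1 := PySem.Int.mod st.1 2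
            let remainder2 := PySem.Int.mod st.2.1 2
            let num1 := PySem.Int.floordiv st.1 2
            let num2 := PySem.Int.floordiv st.2.1 2
            if remainder1 = 0 ∧ remainder2 = 0 then (num1, num2, " " ++ st.2.2)
            else (num1, num2, "#" ++ st.2.2))
          (p.1, p.2, "")
      answer ++ [r.2.2])
    []

-- ===== PORT B =====
-- literal transliteration of B (Source B): guard n <= 0, else mask = (1 << n) - 1 and one
-- comprehension: format((a|b) & mask, 'b').zfill(n).replace('1','#').replace('0',' ').
def solution_alt (n : Int) (arr1 : List Int) (arr2 : List Int) : List String :=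
  if n ≤ 0 then (List.zip arr1 arr2).map (fun _ => "")
  else
    let mask : Int := ((1 : Int) <<< n.toNat) - 1   -- 1 << n; n > 0 here, so the Nat shift is exact
    (List.zip arr1 arr2).map (fun p =>
      PySem.Str.replace
        (PySem.Str.replace
          (PySem.Str.zfill (PySem.Int.toBin (PySem.Int.band (PySem.Int.bor p.1 p.2) mask)) n)
          "1" "#")
        "0" " ")

-- ===== PRECONDITION & SPEC =====
def Spec_solution (n : Int) (arr1 : List Int) (arr2 : List Int) (out : List String) : Prop := out = solution_alt n arr1 arr2
instance (n : Int) (arr1 : List Int) (arr2 : List Int) (out : List String) : Decidable (Spec_solution n arr1 arr2 out) := by unfold Spec_solution; infer_instance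

-- ===== CLAIM (what is proved, stated in full; the proofs are below) =====
def Claim_equal_solution : Prop := ∀ (n : Int) (arr1 : List Int) (arr2 : List Int), Dom_solution n arr1 arr2 → Spec_solution n arr1 arr2 (solution n arr1 arr2)

-- ===== LEMMAS AND PROOFS =====

-- the characters of one row, low bit appended last (shared specification)
def gChars (a b : Int) : Nat → List Char
  | 0 => []
  | k + 1 =>
      gChars (PySem.Int.floordiv a 2) (PySem.Int.floordiv b 2) k ++
        [if PySem.Int.mod a 2 = 0 ∧ PySem.Int.mod b 2 = 0 then ' ' else '#']

-- binary digits of a Nat, most significant first (specification of Nat.toDigits 2)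
def bdigs (m : Nat) : List Char :=
  if h : m < 2 then [Nat.digitChar m]
  else bdigs (m / 2) ++ [Nat.digitChar (m % 2)]
  decreasing_by exact Nat.div_lt_self (by omega) (by omega)

-- ---- Nat bit toolkit ----

theorem and_div_two (x y : Nat) : (x &&& y) / 2 = x / 2 &&& y / 2 := by
  apply Nat.eq_of_testBit_eq
  intro i
  rw [← Nat.testBit_add_one, Nat.testBit_and x y, Nat.testBit_and (x / 2) (y / 2),
    ← Nat.testBit_add_one, ← Nat.testBit_add_one]

theorem or_div_two (x y : Nat) : (x ||| y) / 2 = x / 2 ||| y / 2 := by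
  apply Nat.eq_of_testBit_eq
  intro i
  rw [← Nat.testBit_add_one, Nat.testBit_or x y, Nat.testBit_or (x / 2) (y / 2),
    ← Nat.testBit_add_one, ← Nat.testBit_add_one]

theorem ldiff_div_two (x y : Nat) : (Nat.ldiff x y) / 2 = Nat.ldiff (x / 2) (y / 2) := by
  apply Nat.eq_of_testBit_eq
  intro i
  rw [← Nat.testBit_add_one, Nat.testBit_ldiff x y, Nat.testBit_ldiff (x / 2) (y / 2),
    ← Nat.testBit_add_one, ← Nat.testBit_add_one]

theorem and_mod_two (x y : Nat) :
    (x &&& y) % 2 = if x % 2 = 1 ∧ y % 2 = 1 then 1 else 0 := by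
  have h := Nat.testBit_and x y 0
  rw [Nat.testBit_zero, Nat.testBit_zero, Nat.testBit_zero] at h
  have h' : ((x &&& y) % 2 = 1) ↔ (x % 2 = 1 ∧ y % 2 = 1) := by
    have hb := congrArg (· = true) h
    simpa using hb
  have hxy := Nat.mod_two_eq_zero_or_one (x &&& y)
  split_ifs with hc
  · exact h'.mpr hc
  · have : ¬ ((x &&& y) % 2 = 1) := fun hh => hc (h'.mp hh)
    omega

theorem ldiff_mod_two (x y : Nat) :
    (Nat.ldiff x y) % 2 = if x % 2 = 1 ∧ y % 2 = 0 then 1 else 0 := by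
  have h := Nat.testBit_ldiff x y 0
  rw [Nat.testBit_zero, Nat.testBit_zero, Nat.testBit_zero] at h
  have h' : (Nat.ldiff x y % 2 = 1) ↔ (x % 2 = 1 ∧ ¬ (y % 2 = 1)) := by
    have hb := congrArg (· = true) h
    simpa using hb
  have hxy := Nat.mod_two_eq_zero_or_one (Nat.ldiff x y)
  have hy := Nat.mod_two_eq_zero_or_one y
  split_ifs with hc
  · exact h'.mpr ⟨hc.1, by omega⟩
  · have : ¬ (Nat.ldiff x y % 2 = 1) := fun hh => hc ⟨(h'.mp hh).1, by
      have := (h'.mp hh).2; omega⟩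
    omega

theorem or_mod_two (x y : Nat) :
    (x ||| y) % 2 = if x % 2 = 0 ∧ y % 2 = 0 then 0 else 1 := by
  have h := Nat.testBit_or x y 0
  rw [Nat.testBit_zero, Nat.testBit_zero, Nat.testBit_zero] at h
  have h' : ((x ||| y) % 2 = 1) ↔ (x % 2 = 1 ∨ y % 2 = 1) := by
    have hb := congrArg (· = true) h
    simpa using hb
  have hxy := Nat.mod_two_eq_zero_or_one (x ||| y)
  have hx := Nat.mod_two_eq_zero_or_one x
  have hy := Nat.mod_two_eq_zero_or_one y
  split_ifs with hc
  · have : ¬ ((x ||| y) % 2 = 1) := fun hh => by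
      rcases h'.mp hh with h1 | h1 <;> omega
    omega
  · exact h'.mpr (by omega)

theorem zero_ldiff (y : Nat) : Nat.ldiff 0 y = 0 := by
  apply Nat.eq_of_testBit_eq
  intro i
  rw [Nat.testBit_ldiff, Nat.zero_testBit i, Bool.false_and]


-- bitwise set difference is plain subtraction of the common part
theorem sub_and_eq_ldiff (x y : Nat) : x - (x &&& y) = Nat.ldiff x y := by
  induction x using Nat.strong_induction_on generalizing y with
  | _ x ih =>
    rcases Nat.eq_zero_or_pos x with hx0 | hx0
    · subst hx0; simp [Nat.zero_and, zero_ldiff]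
    · have hlt : x / 2 < x := Nat.div_lt_self hx0 (by omega)
      have ihh := ih (x / 2) hlt (y / 2)
      have hand : (x &&& y) = 2 * (x / 2 &&& y / 2) + (x &&& y) % 2 := by
        conv_lhs => rw [← Nat.div_add_mod (x &&& y) 2]
        rw [and_div_two]
      have hld : Nat.ldiff x y = 2 * Nat.ldiff (x / 2) (y / 2) + (Nat.ldiff x y) % 2 := by
        conv_lhs => rw [← Nat.div_add_mod (Nat.ldiff x y) 2]
        rw [ldiff_div_two]
      have hale : x / 2 &&& y / 2 ≤ x / 2 := Nat.and_le_left
      have hm1 := and_mod_two x y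
      have hm2 := ldiff_mod_two x y
      have hxd := Nat.div_add_mod x 2
      split_ifs at hm1 hm2 <;> omega

-- ---- Int arithmetic helpers ----

theorem mod_negSucc (Y M : Nat) (hM : 0 < M) :
    PySem.Int.mod (-(Y : Int) - 1) (M : Int) = ((M - 1 - Y % M : Nat) : Int) := by
  rw [PySem.Int.mod_eq_emod_of_pos (by exact_mod_cast hM)]
  have hlt : Y % M < M := Nat.mod_lt _ hM
  have hdm := Nat.div_add_mod Y M
  have key : (M : Int) * (-((Y / M : Nat) : Int) - 1) = -((M * (Y / M) : Nat) : Int) - M := by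
    push_cast; ring
  have hd : (-(Y : Int) - 1) =
      ((M - 1 - Y % M : Nat) : Int) + (M : Int) * (-((Y / M : Nat) : Int) - 1) := by
    rw [key]
    generalize hp : M * (Y / M) = p at hdm
    generalize hr : Y % M = r at hdm hlt ⊢
    omega
  rw [hd, Int.add_mul_emod_self_left]
  apply Int.emod_eq_of_lt
  · exact Int.natCast_nonneg _
  · generalize hr : Y % M = r at hlt ⊢
    exact_mod_cast (by omega : M - 1 - r < M)

theorem floordiv_negSucc (m : Nat) :
    PySem.Int.floordiv (-(m : Int) - 1) 2 = -((m / 2 : Nat) : Int) - 1 := by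
  rw [PySem.Int.floordiv_eq_ediv_of_pos (by norm_num)]
  have hd : (-(m : Int) - 1) = (1 - ((m % 2 : Nat) : Int)) + 2 * (-((m / 2 : Nat) : Int) - 1) := by
    have := Nat.div_add_mod m 2
    push_cast
    omega
  rw [hd, Int.add_mul_ediv_left _ _ (by norm_num : (2:Int) ≠ 0)]
  have h2 := Nat.mod_lt m (y := 2) (by omega)
  have : (1 - ((m % 2 : Nat) : Int)) / 2 = 0 := by
    apply Int.ediv_eq_zero_of_lt <;> omega
  omega

-- every Int is ↑m or -↑m - 1
theorem int_rep (a : Int) : (0 ≤ a ∧ a = ((a.toNat : Nat) : Int)) ∨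
    (a < 0 ∧ a = -(((-a - 1).toNat : Nat) : Int) - 1) := by
  rcases Int.lt_or_le a 0 with h | h
  · right; constructor; · exact h
    omega
  · left; constructor; · exact h
    omega

-- ---- facts about PySem.Int.bor ----

-- closed forms of PySem.Int.bor / band on the two sign shapes
theorem bor_nn (A B : Nat) :
    PySem.Int.bor (A : Int) (B : Int) = ((A ||| B : Nat) : Int) := by
  unfold PySem.Int.bor
  rw [if_pos (by omega : (0 : Int) ≤ (A : Int)), if_pos (by omega : (0 : Int) ≤ (B : Int)),
    Int.toNat_natCast, Int.toNat_natCast]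

theorem bor_np (A Y : Nat) :
    PySem.Int.bor (A : Int) (-(Y : Int) - 1) = -((Y - (Y &&& A) : Nat) : Int) - 1 := by
  unfold PySem.Int.bor
  rw [if_pos (by omega : (0 : Int) ≤ (A : Int)),
    if_neg (by omega : ¬ (0 : Int) ≤ -(Y : Int) - 1),
    (by ring : (-(-(Y : Int) - 1) - 1) = (Y : Int)), Int.toNat_natCast, Int.toNat_natCast]

theorem bor_nenn (Ya Yb : Nat) :
    PySem.Int.bor (-(Ya : Int) - 1) (-(Yb : Int) - 1) = -((Ya &&& Yb : Nat) : Int) - 1 := by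
  unfold PySem.Int.bor
  rw [if_neg (by omega : ¬ (0 : Int) ≤ -(Ya : Int) - 1),
    if_neg (by omega : ¬ (0 : Int) ≤ -(Yb : Int) - 1),
    (by ring : (-(-(Ya : Int) - 1) - 1) = (Ya : Int)),
    (by ring : (-(-(Yb : Int) - 1) - 1) = (Yb : Int)), Int.toNat_natCast, Int.toNat_natCast]

theorem band_nn (A B : Nat) :
    PySem.Int.band (A : Int) (B : Int) = ((A &&& B : Nat) : Int) := by
  unfold PySem.Int.band
  rw [if_pos (by omega : (0 : Int) ≤ (A : Int)), if_pos (by omega : (0 : Int) ≤ (B : Int)),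
    Int.toNat_natCast, Int.toNat_natCast]

theorem band_pn (Y B : Nat) :
    PySem.Int.band (-(Y : Int) - 1) (B : Int) = ((B - (B &&& Y) : Nat) : Int) := by
  unfold PySem.Int.band
  rw [if_neg (by omega : ¬ (0 : Int) ≤ -(Y : Int) - 1),
    if_pos (by omega : (0 : Int) ≤ (B : Int)),
    (by ring : (-(-(Y : Int) - 1) - 1) = (Y : Int)), Int.toNat_natCast, Int.toNat_natCast]

-- floor-div and mod of a nonnegative cast by 2
theorem fd_natCast (m : Nat) : PySem.Int.floordiv (m : Int) 2 = ((m / 2 : Nat) : Int) := by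
  exact_mod_cast PySem.Int.floordiv_natCast m 2

theorem md_natCast (m : Nat) : PySem.Int.mod (m : Int) 2 = ((m % 2 : Nat) : Int) := by
  exact_mod_cast PySem.Int.mod_natCast m 2

theorem md_negSucc (Y : Nat) :
    PySem.Int.mod (-(Y : Int) - 1) 2 = ((1 - Y % 2 : Nat) : Int) := by
  have h := mod_negSucc Y 2 (by omega)
  simpa using h


theorem fd_bor (a b : Int) :
    PySem.Int.floordiv (PySem.Int.bor a b) 2 =
      PySem.Int.bor (PySem.Int.floordiv a 2) (PySem.Int.floordiv b 2) := by
  have key : ∀ x y : Int,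
      PySem.Int.floordiv (PySem.Int.bor x y) 2 =
        PySem.Int.bor (PySem.Int.floordiv x 2) (PySem.Int.floordiv y 2) ∨
      PySem.Int.floordiv (PySem.Int.bor y x) 2 =
        PySem.Int.bor (PySem.Int.floordiv y 2) (PySem.Int.floordiv x 2) := by
    intro x y
    rcases int_rep x with ⟨hx0, hx⟩ | ⟨hx0, hx⟩ <;>
      rcases int_rep y with ⟨hy0, hy⟩ | ⟨hy0, hy⟩
    · left
      rw [hx, hy, bor_nn, fd_natCast, fd_natCast, fd_natCast, bor_nn, or_div_two]
    · left
      rw [hx, hy, bor_np, floordiv_negSucc, fd_natCast, floordiv_negSucc, bor_np,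
        sub_and_eq_ldiff, sub_and_eq_ldiff, ldiff_div_two]
    · right
      rw [hy, hx, bor_np, floordiv_negSucc, fd_natCast, floordiv_negSucc, bor_np,
        sub_and_eq_ldiff, sub_and_eq_ldiff, ldiff_div_two]
    · left
      rw [hx, hy, bor_nenn, floordiv_negSucc, floordiv_negSucc, floordiv_negSucc,
        bor_nenn, and_div_two]
  rcases key a b with h | h
  · exact h
  · rw [PySem.Int.bor_comm a b, h, PySem.Int.bor_comm]

theorem md_bor (a b : Int) :
    (PySem.Int.mod (PySem.Int.bor a b) 2 = 0 ↔
      (PySem.Int.mod a 2 = 0 ∧ PySem.Int.mod b 2 = 0)) := by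
  have key : ∀ x y : Int,
      (PySem.Int.mod (PySem.Int.bor x y) 2 = 0 ↔
        (PySem.Int.mod x 2 = 0 ∧ PySem.Int.mod y 2 = 0)) ∨
      (PySem.Int.mod (PySem.Int.bor y x) 2 = 0 ↔
        (PySem.Int.mod y 2 = 0 ∧ PySem.Int.mod x 2 = 0)) := by
    intro x y
    rcases int_rep x with ⟨hx0, hx⟩ | ⟨hx0, hx⟩ <;>
      rcases int_rep y with ⟨hy0, hy⟩ | ⟨hy0, hy⟩
    · left
      rw [hx, hy, bor_nn, md_natCast, md_natCast, md_natCast]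
      have h := or_mod_two x.toNat y.toNat
      have h1 := Nat.mod_two_eq_zero_or_one x.toNat
      have h2 := Nat.mod_two_eq_zero_or_one y.toNat
      split_ifs at h <;> constructor <;> intro hh <;>
        first
        | (constructor <;> omega)
        | omega
    · left
      rw [hx, hy, bor_np, md_negSucc, md_natCast, md_negSucc, sub_and_eq_ldiff]
      have h := ldiff_mod_two (-y - 1).toNat x.toNat
      have h1 := Nat.mod_two_eq_zero_or_one x.toNat
      have h2 := Nat.mod_two_eq_zero_or_one (-y - 1).toNat
      split_ifs at h <;> constructor <;> intro hh <;>
        first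
        | (constructor <;> omega)
        | omega
    · right
      rw [hy, hx, bor_np, md_negSucc, md_natCast, md_negSucc, sub_and_eq_ldiff]
      have h := ldiff_mod_two (-x - 1).toNat y.toNat
      have h1 := Nat.mod_two_eq_zero_or_one y.toNat
      have h2 := Nat.mod_two_eq_zero_or_one (-x - 1).toNat
      split_ifs at h <;> constructor <;> intro hh <;>
        first
        | (constructor <;> omega)
        | omega
    · left
      rw [hx, hy, bor_nenn, md_negSucc, md_negSucc, md_negSucc]
      have h := and_mod_two (-x - 1).toNat (-y - 1).toNat
      have h1 := Nat.mod_two_eq_zero_or_one (-x - 1).toNat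
      have h2 := Nat.mod_two_eq_zero_or_one (-y - 1).toNat
      split_ifs at h <;> constructor <;> intro hh <;>
        first
        | (constructor <;> omega)
        | omega
  rcases key a b with h | h
  · exact h
  · rw [PySem.Int.bor_comm a b, h, and_comm]

-- ---- masking: x & (2^k - 1) = x % 2^k ----

theorem band_mask (x : Int) (k : Nat) :
    PySem.Int.band x ((2 : Int) ^ k - 1) = PySem.Int.mod x ((2 : Int) ^ k) := by
  have hpow : ((2 ^ k : Nat) : Int) = (2 : Int) ^ k := by push_cast; ring
  have hp1 : (1 : Nat) ≤ 2 ^ k := Nat.one_le_two_pow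
  have hmask : ((2 ^ k - 1 : Nat) : Int) = (2 : Int) ^ k - 1 := by
    push_cast [hp1]; omega
  rcases int_rep x with ⟨hx0, hx⟩ | ⟨hx0, hx⟩
  · rw [hx, ← hmask, band_nn, Nat.and_two_pow_sub_one_eq_mod, ← hpow]
    exact_mod_cast (PySem.Int.mod_natCast x.toNat (2 ^ k)).symm
  · rw [hx, ← hmask, band_pn, ← hpow, mod_negSucc _ _ (by omega)]
    congr 1
    rw [Nat.and_comm, Nat.and_two_pow_sub_one_eq_mod]

-- ---- mod recursion ----

theorem mod_two_pow_succ (x : Int) (k : Nat) :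
    PySem.Int.mod x ((2 : Int) ^ (k + 1)) =
      2 * PySem.Int.mod (PySem.Int.floordiv x 2) ((2 : Int) ^ k) + PySem.Int.mod x 2 := by
  have hP : (0 : Int) < 2 ^ k := by positivity
  rw [PySem.Int.mod_eq_emod_of_pos (by positivity), PySem.Int.mod_eq_emod_of_pos hP,
    PySem.Int.mod_eq_emod_of_pos (by norm_num), PySem.Int.floordiv_eq_ediv_of_pos (by norm_num)]
  have e1 : 2 * (x / 2) + x % 2 = x := Int.ediv_add_emod x 2
  have e2 : (2 : Int) ^ k * (x / 2 / 2 ^ k) + (x / 2) % 2 ^ k = x / 2 :=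
    Int.ediv_add_emod (x / 2) ((2 : Int) ^ k)
  have hs0 : (0 : Int) ≤ (x / 2) % 2 ^ k := Int.emod_nonneg _ (by omega)
  have hs1 : (x / 2) % 2 ^ k < 2 ^ k := Int.emod_lt_of_pos _ hP
  have h2p : (2 : Int) ^ (k + 1) = 2 * 2 ^ k := by ring
  have hd : x = (2 * ((x / 2) % 2 ^ k) + x % 2) + (2 : Int) ^ (k + 1) * (x / 2 / 2 ^ k) := by
    rw [h2p, mul_assoc]
    generalize (x / 2) % 2 ^ k = s at e2 ⊢
    generalize (2 : Int) ^ k * (x / 2 / 2 ^ k) = pq at e2 ⊢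
    omega
  have hb : (0 : Int) ≤ 2 * ((x / 2) % 2 ^ k) + x % 2 ∧
      2 * ((x / 2) % 2 ^ k) + x % 2 < 2 ^ (k + 1) := by
    rw [h2p]
    generalize (x / 2) % 2 ^ k = s at hs0 hs1 ⊢
    generalize (2 : Int) ^ k = P at hs0 hs1 ⊢
    omega
  conv_lhs => rw [hd]
  rw [Int.add_mul_emod_self_left]
  exact Int.emod_eq_of_lt hb.1 hb.2

-- ---- Nat.toDigits 2 = bdigs ----

theorem toDigitsCore_eq (fuel m : Nat) (acc : List Char) (h : m ≤ fuel) :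
    Nat.toDigitsCore 2 (fuel + 1) m acc = bdigs m ++ acc := by
  induction fuel generalizing m acc with
  | zero =>
    have hm : m = 0 := by omega
    subst hm
    simp [Nat.toDigitsCore, bdigs]
  | succ fuel ih =>
    rw [Nat.toDigitsCore]
    by_cases h2 : m / 2 = 0
    · have hm2 : m < 2 := by omega
      rw [if_pos h2, bdigs, dif_pos hm2, Nat.mod_eq_of_lt hm2]
      simp
    · have hm2 : 2 ≤ m := by omega
      rw [if_neg h2, ih (m / 2) _ (by omega)]
      conv_rhs => rw [bdigs]
      rw [dif_neg (by omega : ¬ m < 2)]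
      simp

theorem toDigits_two_eq (m : Nat) : Nat.toDigits 2 m = bdigs m := by
  have := toDigitsCore_eq m m [] (le_refl m)
  simpa [Nat.toDigits] using this

theorem bdigs_head (m : Nat) :
    ∃ c rest, bdigs m = c :: rest ∧ (c = '0' ∨ c = '1') := by
  induction m using Nat.strong_induction_on with
  | _ m ih =>
    by_cases hm : m < 2
    · refine ⟨Nat.digitChar m, [], ?_, ?_⟩
      · rw [bdigs, dif_pos hm]
      · interval_cases m <;> decide
    · obtain ⟨c, rest, hcr, hc⟩ := ih (m / 2) (Nat.div_lt_self (by omega) (by omega))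
      refine ⟨c, rest ++ [Nat.digitChar (m % 2)], ?_, hc⟩
      rw [bdigs, dif_neg hm, hcr]
      simp

theorem bdigs_len_le (k m : Nat) (hk : 1 ≤ k) (hm : m < 2 ^ k) :
    (bdigs m).length ≤ k := by
  induction k, hk using Nat.le_induction generalizing m with
  | base =>
    have hm2 : m < 2 := by simpa using hm
    rw [bdigs, dif_pos hm2]
    simp
  | succ k hk ih =>
    by_cases hm2 : m < 2
    · rw [bdigs, dif_pos hm2]
      simp only [List.length_singleton]
      omega
    · rw [bdigs, dif_neg hm2]
      have hdiv : m / 2 < 2 ^ k := by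
        rw [Nat.div_lt_iff_lt_mul (by omega)]
        calc m < 2 ^ (k + 1) := hm
        _ = 2 ^ k * 2 := by ring
      have := ih (m / 2) hdiv
      simp at this ⊢
      omega

theorem zfill_digits (cs : List Char) (k : Nat) (c0 : Char) (rest : List Char)
    (hcs : cs = c0 :: rest) (hc : c0 = '0' ∨ c0 = '1') (hlen : cs.length ≤ k) :
    PySem.Chars.zfill cs (k : Int) = List.replicate (k - cs.length) '0' ++ cs := by
  unfold PySem.Chars.zfill
  by_cases hw : (k : Int) ≤ (cs.length : Int)
  · rw [if_pos hw]
    have : k = cs.length := by omega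
    rw [this]
    simp
  · rw [if_neg hw, hcs]
    have hne : ¬ (c0 = '+' ∨ c0 = '-') := by
      rcases hc with hc | hc <;> subst hc <;> decide
    dsimp only
    rw [if_neg hne, Int.toNat_natCast]

-- padded binary digits split off their last bit
theorem pad_split (k m : Nat) (hk : 1 ≤ k) (hm : m < 2 ^ (k + 1)) :
    PySem.Chars.zfill (bdigs m) ((k : Int) + 1) =
      PySem.Chars.zfill (bdigs (m / 2)) (k : Int) ++ [Nat.digitChar (m % 2)] := by
  have hcast : ((k : Int) + 1) = ((k + 1 : Nat) : Int) := by push_cast; ring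
  by_cases hm2 : m < 2
  · have hd0 : m / 2 = 0 := by omega
    have hmod : m % 2 = m := Nat.mod_eq_of_lt hm2
    have hb : bdigs m = [Nat.digitChar m] := by rw [bdigs, dif_pos hm2]
    have hb0 : bdigs (m / 2) = ['0'] := by rw [hd0, bdigs]; rfl
    have hcm : Nat.digitChar m = '0' ∨ Nat.digitChar m = '1' := by
      interval_cases m <;> decide
    rw [hcast, hb, zfill_digits _ _ _ _ rfl hcm (by simp), hb0,
      zfill_digits _ _ _ _ rfl (by left; rfl) (by simpa using hk), hmod]
    simp only [List.length_singleton]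
    have h1 : (k + 1 - 1 : Nat) = (k - 1) + 1 := by omega
    rw [h1, List.replicate_succ']
  · have hb : bdigs m = bdigs (m / 2) ++ [Nat.digitChar (m % 2)] := by
      rw [bdigs, dif_neg hm2]
    obtain ⟨c, rest, hcr, hc⟩ := bdigs_head (m / 2)
    have hdiv : m / 2 < 2 ^ k := by
      rw [Nat.div_lt_iff_lt_mul (by omega)]
      calc m < 2 ^ (k + 1) := hm
      _ = 2 ^ k * 2 := by ring
    have hlen : (bdigs (m / 2)).length ≤ k := bdigs_len_le k (m / 2) hk hdiv
    have hlen2 : (bdigs m).length ≤ k + 1 := by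
      rw [hb]
      simp only [List.length_append, List.length_singleton]
      omega
    rw [hcast, hb, zfill_digits _ _ c (rest ++ [Nat.digitChar (m % 2)])
        (by rw [hcr, List.cons_append]) hc (by rw [← hb]; exact hlen2),
      zfill_digits _ _ c rest hcr hc hlen]
    have harith : k + 1 - (bdigs (m / 2) ++ [Nat.digitChar (m % 2)]).length =
        k - (bdigs (m / 2)).length := by
      simp only [List.length_append, List.length_singleton]
      omega
    rw [harith]
    simp

theorem replace_go_single (o d : Char) (fuel : Nat) :
    ∀ (l acc : List Char), l.length ≤ fuel →
      PySem.Chars.replace.go [o] [d] fuel l acc =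
        acc.reverse ++ l.map (fun c => if c = o then d else c) := by
  induction fuel with
  | zero =>
    intro l acc hl
    have : l = [] := by
      cases l
      · rfl
      · simp at hl
    subst this
    simp [PySem.Chars.replace.go]
  | succ fuel ih =>
    intro l acc hl
    cases l with
    | nil => simp [PySem.Chars.replace.go]
    | cons c t =>
      rw [PySem.Chars.replace.go]
      by_cases hco : c = o
      · subst hco
        have hpre : List.isPrefixOf [c] (c :: t) = true := by
          simp [List.isPrefixOf]
        rw [if_pos hpre]
        have hdrop : List.drop ([c] : List Char).length (c :: t) = t := by simp
        rw [hdrop, ih t _ (by simpa using hl)]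
        simp
      · have hpre : ¬ (List.isPrefixOf [o] (c :: t) = true) := by
          simp [List.isPrefixOf]
          intro hh
          exact absurd hh.symm hco
        rw [if_neg hpre, ih t _ (by simpa using hl)]
        simp [hco]

theorem replace_single (cs : List Char) (o d : Char) :
    PySem.Chars.replace cs [o] [d] = cs.map (fun c => if c = o then d else c) := by
  rw [PySem.Chars.replace]
  rw [if_neg (by simp)]
  rw [replace_go_single o d cs.length cs [] (le_refl _)]
  simp

-- replace '1'→'#' then '0'→' ' acts as the obvious character map
theorem replace_chars (cs : List Char) (h : ∀ c ∈ cs, c = '0' ∨ c = '1') :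
    PySem.Chars.replace (PySem.Chars.replace cs ['1'] ['#']) ['0'] [' '] =
      cs.map (fun c => if c = '1' then '#' else ' ') := by
  rw [replace_single, replace_single, List.map_map]
  apply List.map_congr_left
  intro c hc
  rcases h c hc with hc0 | hc1 <;> subst_vars <;> rfl

-- ---- the B row equals gChars ----

theorem bdigs_all (m : Nat) : ∀ c ∈ bdigs m, c = '0' ∨ c = '1' := by
  induction m using Nat.strong_induction_on with
  | _ m ih =>
    by_cases hm : m < 2
    · rw [bdigs, dif_pos hm]
      intro c hcm
      simp at hcm
      subst hcm
      interval_cases m <;> decide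
    · rw [bdigs, dif_neg hm]
      intro c hcm
      rcases List.mem_append.mp hcm with h | h
      · exact ih (m / 2) (Nat.div_lt_self (by omega) (by omega)) c h
      · simp at h
        subst h
        rcases Nat.mod_two_eq_zero_or_one m with h2 | h2 <;> rw [h2] <;> decide

theorem zfill_all (k m : Nat) (hk : 1 ≤ k) (hm : m < 2 ^ k) :
    ∀ c ∈ PySem.Chars.zfill (bdigs m) (k : Int), c = '0' ∨ c = '1' := by
  obtain ⟨c0, rest, hcr, hc0⟩ := bdigs_head m
  rw [zfill_digits _ _ c0 rest hcr hc0 (bdigs_len_le k m hk hm)]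
  intro c hcm
  rcases List.mem_append.mp hcm with h | h
  · left; exact List.eq_of_mem_replicate h
  · exact bdigs_all m c h

theorem toBin_nonneg (v : Int) (hv : 0 ≤ v) : PySem.Int.toBinChars v = bdigs v.toNat := by
  unfold PySem.Int.toBinChars
  rw [if_neg (by omega), toDigits_two_eq]

theorem modpow_bounds (x : Int) (k : Nat) :
    0 ≤ PySem.Int.mod x ((2 : Int) ^ k) ∧ PySem.Int.mod x ((2 : Int) ^ k) < 2 ^ k := by
  rw [PySem.Int.mod_eq_emod_of_pos (by positivity)]
  exact ⟨Int.emod_nonneg _ (by positivity), Int.emod_lt_of_pos _ (by positivity)⟩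

theorem md_bounds (x : Int) : 0 ≤ PySem.Int.mod x 2 ∧ PySem.Int.mod x 2 < 2 := by
  rw [PySem.Int.mod_eq_emod_of_pos (by norm_num)]
  exact ⟨Int.emod_nonneg _ (by norm_num), Int.emod_lt_of_pos _ (by norm_num)⟩

theorem row_core (k : Nat) (hk : 1 ≤ k) (a b : Int) :
    (PySem.Chars.zfill
        (bdigs (PySem.Int.mod (PySem.Int.bor a b) ((2 : Int) ^ k)).toNat) (k : Int)).map
      (fun c => if c = '1' then '#' else ' ') = gChars a b k := by
  induction k, hk using Nat.le_induction generalizing a b with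
  | base =>
    rw [pow_one]
    have hb := md_bounds (PySem.Int.bor a b)
    by_cases hc : PySem.Int.mod a 2 = 0 ∧ PySem.Int.mod b 2 = 0
    · have hr : PySem.Int.mod (PySem.Int.bor a b) 2 = 0 := (md_bor a b).mpr hc
      rw [hr]
      have h0 : bdigs (0 : Int).toNat = ['0'] := by rw [bdigs]; decide
      rw [h0]
      have hz : PySem.Chars.zfill ['0'] ((1 : Nat) : Int) = ['0'] := by decide
      rw [hz, gChars, gChars, if_pos hc]
      rfl
    · have hr : PySem.Int.mod (PySem.Int.bor a b) 2 = 1 := by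
        have hne : ¬ PySem.Int.mod (PySem.Int.bor a b) 2 = 0 :=
          fun hh => hc ((md_bor a b).mp hh)
        omega
      rw [hr]
      have h1 : bdigs (1 : Int).toNat = ['1'] := by rw [bdigs]; decide
      rw [h1]
      have hz : PySem.Chars.zfill ['1'] ((1 : Nat) : Int) = ['1'] := by decide
      rw [hz, gChars, gChars, if_neg hc]
      rfl
  | succ k hk ih =>
    have hrec := mod_two_pow_succ (PySem.Int.bor a b) k
    rw [fd_bor] at hrec
    have hM := modpow_bounds (PySem.Int.bor (PySem.Int.floordiv a 2) (PySem.Int.floordiv b 2)) k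
    have hr := md_bounds (PySem.Int.bor a b)
    have hpow : ((2 ^ k : Nat) : Int) = (2 : Int) ^ k := by push_cast; ring
    set M' := PySem.Int.mod
      (PySem.Int.bor (PySem.Int.floordiv a 2) (PySem.Int.floordiv b 2)) ((2 : Int) ^ k) with hM'
    set r := PySem.Int.mod (PySem.Int.bor a b) 2 with hrdef
    have hN : (PySem.Int.mod (PySem.Int.bor a b) ((2 : Int) ^ (k + 1))).toNat =
        2 * M'.toNat + r.toNat := by
      rw [hrec]; omega
    have hnm : M'.toNat < 2 ^ k := by
      rw [← hpow] at hM
      omega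
    have hbound : 2 * M'.toNat + r.toNat < 2 ^ (k + 1) := by
      have h2p : (2 : Nat) ^ (k + 1) = 2 * 2 ^ k := by ring
      omega
    have hd2 : (2 * M'.toNat + r.toNat) / 2 = M'.toNat := by omega
    have hm2 : (2 * M'.toNat + r.toNat) % 2 = r.toNat := by omega
    have hcast : ((k + 1 : Nat) : Int) = ((k : Int) + 1) := by push_cast; ring
    rw [hN, hcast, pad_split k _ hk hbound, hd2, hm2, List.map_append, ih]
    rw [gChars]
    congr 1
    by_cases hc : PySem.Int.mod a 2 = 0 ∧ PySem.Int.mod b 2 = 0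
    · have hr0 : r = 0 := (md_bor a b).mpr hc
      rw [if_pos hc, hr0]
      rfl
    · have hr1 : r = 1 := by
        have hne : ¬ r = 0 := fun hh => hc ((md_bor a b).mp hh)
        omega
      rw [if_neg hc, hr1]
      rfl

theorem row_eq (k : Nat) (hk : 1 ≤ k) (a b : Int) :
    (PySem.Chars.replace
        (PySem.Chars.replace
          (PySem.Chars.zfill
            (PySem.Int.toBinChars (PySem.Int.mod (PySem.Int.bor a b) ((2:Int) ^ k)))
            (k : Int))
          ['1'] ['#'])
        ['0'] [' ']) = gChars a b k := by
  have hb := modpow_bounds (PySem.Int.bor a b) k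
  rw [toBin_nonneg _ hb.1]
  have hmlt : (PySem.Int.mod (PySem.Int.bor a b) ((2 : Int) ^ k)).toNat < 2 ^ k := by
    have hpow : ((2 ^ k : Nat) : Int) = (2 : Int) ^ k := by push_cast; ring
    have h2 : PySem.Int.mod (PySem.Int.bor a b) ((2 : Int) ^ k) < ((2 ^ k : Nat) : Int) := by
      rw [hpow]; exact hb.2
    omega
  rw [replace_chars _ (zfill_all k _ hk hmlt), row_core k hk a b]

-- ---- the A row fold ----

theorem foldA (l : List Int) (a b : Int) (s : String) :
    ((l.foldl
        (fun (st : Int × Int × String) (_i : Int) =>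
          if PySem.Int.mod st.1 2 = 0 ∧ PySem.Int.mod st.2.1 2 = 0 then
            (PySem.Int.floordiv st.1 2, PySem.Int.floordiv st.2.1 2, " " ++ st.2.2)
          else
            (PySem.Int.floordiv st.1 2, PySem.Int.floordiv st.2.1 2, "#" ++ st.2.2))
        (a, b, s)).2.2).toList = gChars a b l.length ++ s.toList := by
  induction l generalizing a b s with
  | nil => simp [gChars]
  | cons x l ih =>
    rw [List.foldl_cons]
    by_cases hc : PySem.Int.mod a 2 = 0 ∧ PySem.Int.mod b 2 = 0
    · rw [if_pos hc, ih, List.length_cons, gChars, if_pos hc]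
      simp [String.toList_append, (show (" " : String).toList = [' '] by decide)]
    · rw [if_neg hc, ih, List.length_cons, gChars, if_neg hc]
      simp [String.toList_append, (show ("#" : String).toList = ['#'] by decide)]

theorem foldl_append_map {α : Type} (f : α → String) (l : List α) (acc : List String) :
    l.foldl (fun ans x => ans ++ [f x]) acc = acc ++ l.map f := by
  induction l generalizing acc with
  | nil => simp
  | cons x l ih => simp [ih]

-- ===== VERDICT (by name: the statement is the Claim_ definition above) =====
theorem solution_spec : Claim_equal_solution := by
  intro n arr1 arr2 _hdom
  show solution n arr1 arr2 = solution_alt n arr1 arr2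
  rcases (by omega : n ≤ 0 ∨ 0 < n) with hn | hn
  · have hr : PySem.List.pyRange 0 n 1 = [] := by
      rw [PySem.List.pyRange_one]
      have h0 : (n - 0).toNat = 0 := by omega
      rw [h0]
      simp
    unfold solution solution_alt
    rw [if_pos hn, hr]
    simp only [List.foldl_nil]
    rw [foldl_append_map]
    simp
  · have hk1 : 1 ≤ n.toNat := by omega
    have hnn : n = (n.toNat : Int) := by omega
    unfold solution solution_alt
    rw [if_neg (by omega : ¬ n ≤ 0)]
    dsimp only
    rw [foldl_append_map]
    rw [List.nil_append]
    apply List.map_congr_left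
    intro p _hp
    apply String.toList_inj.mp
    rw [foldA, PySem.List.length_pyRange_one]
    have hlen : (n - 0).toNat = n.toNat := by omega
    rw [hlen]
    rw [PySem.Str.toList_replace, PySem.Str.toList_replace, PySem.Str.toList_zfill,
      PySem.Int.toList_toBin]
    rw [(show ("1" : String).toList = ['1'] by decide),
      (show ("#" : String).toList = ['#'] by decide),
      (show ("0" : String).toList = ['0'] by decide),
      (show (" " : String).toList = [' '] by decide),
      (show ("" : String).toList = ([] : List Char) by decide)]
    have hmask : ((1 : Int) <<< n.toNat) - 1 = (2 : Int) ^ n.toNat - 1 := by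
      rw [Int.shiftLeft_eq]; ring
    rw [hmask, band_mask]
    conv_rhs => rw [hnn]
    simp only [Int.toNat_natCast]
    rw [row_eq n.toNat hk1 p.1 p.2]
    simp
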